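-- pv_equiv track=rewrite | github.com/niks199/aoc_2025 | 06.py | grand_total
-- ===== SOURCE A (Python) =====
-- from typing import List
-- from math import ceil, floor, prod
--
-- def grand_total(lines: List[str]):
--     n_lines = len(lines)
--
--     nums = []
--     for line_i in range(n_lines - 1):
--         nn = [w.strip() for w in lines[line_i].split(' ') if w]
--         nums.append(list(map(int, nn)))
--
--     opers = [c for c in lines[-1] if c != ' ']
--
--     total = 0
--     for i in range(len(nums[0])):
--         uu = []
--         for row_i in range(len(nums)):
--             uu.append(nums[row_i][i])
--         t = 0
--         if opers[i] == '*':
--             t = prod(uu)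
--         else:
--             t= sum(uu)
--         total += t
--
--     return total
-- ===== SOURCE B (Python) =====
-- def grand_total(lines):
--     rows = [[int(w.strip()) for w in line.split(' ') if w] for line in lines[:-1]]
--     opers = [c for c in lines[-1] if c != ' ']
--     acc = [1 if opers[j] == '*' else 0 for j in range(len(rows[0]))]
--     for row in rows:
--         for j in range(len(acc)):
--             if opers[j] == '*':
--                 acc[j] *= row[j]
--             else:
--                 acc[j] += row[j]
--     return sum(acc)
-- ===== Notes on version B (the rewrite author's own statement) =====
-- stated objective: alternative
-- what changed: Instead of gathering each column into a temporary list and reducing it (column-major, one list per column), B keeps one running per-column accumulator list (seeded 1 for '*' columns, 0 for '+') and updates it in a single row-major pass, summing the accumulators at the end.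
import Mathlib
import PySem

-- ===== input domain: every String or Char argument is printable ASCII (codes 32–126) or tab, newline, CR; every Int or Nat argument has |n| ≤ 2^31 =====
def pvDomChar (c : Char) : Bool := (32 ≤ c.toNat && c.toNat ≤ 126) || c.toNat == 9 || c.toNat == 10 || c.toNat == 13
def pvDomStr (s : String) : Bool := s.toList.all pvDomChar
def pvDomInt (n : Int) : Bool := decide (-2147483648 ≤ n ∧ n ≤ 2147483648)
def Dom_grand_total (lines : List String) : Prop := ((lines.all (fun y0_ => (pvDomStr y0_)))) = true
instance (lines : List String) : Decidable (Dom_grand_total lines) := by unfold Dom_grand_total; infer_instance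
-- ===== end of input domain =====

-- B replaces A's per-column gather-and-reduce with a single row-major pass over a maintained
-- per-column accumulator list (alternative decomposition, same asymptotic cost).

-- ===== PORT A =====
-- shared parsing helper: [int(w.strip()) for w in line.split(' ') if w]
def pvParseRow (line : String) : List Int :=
  (((PySem.Str.split? line " ").getD []).filter (fun w => w ≠ "")).map
    (fun w => (PySem.Int.ofStr? (PySem.Str.strip w)).getD 0)

def grand_total (lines : List String) : Int :=
  let n_lines : Int := lines.length
  let nums : List (List Int) :=
    (PySem.List.pyRange 0 (n_lines - 1) 1).foldl
      (fun nums line_i => nums ++ [pvParseRow (PySem.List.pyGetD lines line_i "")]) []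
  let opers : List Char := (PySem.List.pyGetD lines (-1) "").toList.filter (fun c => c ≠ ' ')
  (PySem.List.pyRange 0 (((PySem.List.pyGetD nums 0 []).length : Int)) 1).foldl
    (fun total i =>
      let uu : List Int :=
        (PySem.List.pyRange 0 ((nums.length : Int)) 1).foldl
          (fun uu row_i => uu ++ [PySem.List.pyGetD (PySem.List.pyGetD nums row_i []) i 0]) []
      let t : Int := if PySem.List.pyGetD opers i ' ' = '*' then uu.prod else uu.sum
      total + t) 0

-- ===== PORT B =====
def grand_total_alt (lines : List String) : Int :=
  let rows : List (List Int) := (PySem.List.slice lines none (some (-1))).map pvParseRow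
  let opers : List Char := (PySem.List.pyGetD lines (-1) "").toList.filter (fun c => c ≠ ' ')
  let acc0 : List Int :=
    (List.range (PySem.List.pyGetD rows 0 []).length).map
      (fun (j : Nat) => if PySem.List.pyGetD opers (j : Int) ' ' = '*' then (1 : Int) else 0)
  let acc : List Int :=
    rows.foldl (fun acc row =>
      (List.range acc.length).foldl (fun (acc : List Int) (j : Nat) =>
        if PySem.List.pyGetD opers (j : Int) ' ' = '*' then
          acc.set j (acc.getD j 0 * PySem.List.pyGetD row (j : Int) 0)
        else
          acc.set j (acc.getD j 0 + PySem.List.pyGetD row (j : Int) 0)) acc) acc0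
  acc.sum

-- ===== PRECONDITION & SPEC =====
-- tokenization of a data line, used only by Pre_ (mirrors "[w for w in line.split(' ') if w]")
def pvTokens (line : String) : List String :=
  ((PySem.Str.split? line " ").getD []).filter (fun w => w ≠ "")

-- Pre_ holds exactly where the Python A returns normally: at least two lines (else IndexError),
-- every token of every data line parses as int (else ValueError), every data line has at least
-- as many tokens as the first one, and at least that many non-space operator characters exist
-- (else IndexError).
def Pre_grand_total (lines : List String) : Prop :=
  2 ≤ lines.length ∧
  (lines.dropLast.all (fun line =>
      (pvTokens line).all (fun w => (PySem.Int.ofStr? (PySem.Str.strip w)).isSome) &&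
      decide ((pvTokens (lines.headD "")).length ≤ (pvTokens line).length))) = true ∧
  (pvTokens (lines.headD "")).length ≤
    ((lines.getLastD "").toList.filter (fun c => c ≠ ' ')).length
instance (lines : List String) : Decidable (Pre_grand_total lines) := by
  unfold Pre_grand_total; infer_instance

def pvWitness_grand_total : List String := ["1 2", "3 4", "+ *"]

def Spec_grand_total (lines : List String) (out : Int) : Prop := out = grand_total_alt lines
instance (lines : List String) (out : Int) : Decidable (Spec_grand_total lines out) := by
  unfold Spec_grand_total; infer_instance

-- ===== CLAIM (what is proved, stated in full; the proofs are below) =====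
def Claim_equal_grand_total : Prop :=
  ∀ (lines : List String), Dom_grand_total lines → Pre_grand_total lines →
    Spec_grand_total lines (grand_total lines)

-- ===== LEMMAS AND PROOFS =====

theorem pv_map_getD_range {α : Type} [Inhabited α] (xs : List α) (d : α) (n : Nat)
    (h : n ≤ xs.length) :
    (List.range n).map (fun (k : Nat) => PySem.List.pyGetD xs ((k : Int)) d) = xs.take n := by
  induction n with
  | zero => simp
  | succ m ih =>
    rw [List.range_succ, List.map_append, ih (by omega)]
    have hm : m < xs.length := by omega
    rw [List.take_add_one]
    simp [PySem.List.pyGetD_natCast, List.getElem?_eq_getElem hm,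
      List.getD_eq_getElem?_getD]

-- column value read by both programs: row[j] (0 is never hit inside Pre_)
def pvCol (j : Nat) (row : List Int) : Int := PySem.List.pyGetD row (j : Int) 0

-- B's per-element update, parameterised by the operator list
def pvUpd (O : List Char) (row : List Int) (j : Nat) (a : Int) : Int :=
  if PySem.List.pyGetD O (j : Int) ' ' = '*' then a * pvCol j row else a + pvCol j row

theorem pv_getD_map_range (g : Nat → Int) (n j : Nat) (h : j < n) :
    (((List.range n).map g).getD j 0) = g j := by
  rw [List.getD_eq_getElem?_getD, List.getElem?_map]
  simp [h]

theorem pv_foldl_set_range (f : Nat → Int → Int) (n : Nat) :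
    ∀ (acc : List Int), n ≤ acc.length →
    (List.range n).foldl (fun (acc : List Int) (j : Nat) => acc.set j (f j (acc.getD j 0))) acc
      = (List.range n).map (fun j => f j (acc.getD j 0)) ++ acc.drop n := by
  induction n with
  | zero => intro acc _; simp
  | succ m ih =>
    intro acc h
    rw [List.range_succ, List.foldl_append, ih acc (by omega), List.map_append]
    have hm : m < acc.length := by omega
    have hlen : ((List.range m).map (fun j => f j (acc.getD j 0))).length = m := by simp
    have hget : (((List.range m).map (fun j => f j (acc.getD j 0))) ++ acc.drop m).getD m 0
        = acc.getD m 0 := by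
      rw [List.getD_eq_getElem?_getD, List.getElem?_append_right (by omega), hlen]
      simp [List.getElem?_drop, List.getD_eq_getElem?_getD]
    simp only [List.foldl_cons, List.foldl_nil, hget]
    rw [List.set_append_right _ _ (by omega), hlen]
    simp [List.getD_eq_getElem?_getD, List.getElem?_eq_getElem hm]
    rw [List.drop_eq_getElem_cons hm, List.set_cons_zero]

-- B's inner loop on an accumulator of the form (range L).map g
theorem pv_inner_loop (O : List Char) (row : List Int) (L : Nat) (g : Nat → Int) :
    (List.range ((List.range L).map g).length).foldl
      (fun (acc : List Int) (j : Nat) =>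
        if PySem.List.pyGetD O (j : Int) ' ' = '*' then
          acc.set j (acc.getD j 0 * PySem.List.pyGetD row (j : Int) 0)
        else
          acc.set j (acc.getD j 0 + PySem.List.pyGetD row (j : Int) 0)) ((List.range L).map g)
    = (List.range L).map (fun j => pvUpd O row j (g j)) := by
  have hfun : (fun (acc : List Int) (j : Nat) =>
        if PySem.List.pyGetD O (j : Int) ' ' = '*' then
          acc.set j (acc.getD j 0 * PySem.List.pyGetD row (j : Int) 0)
        else
          acc.set j (acc.getD j 0 + PySem.List.pyGetD row (j : Int) 0))
      = (fun (acc : List Int) (j : Nat) => acc.set j (pvUpd O row j (acc.getD j 0))) := by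
    funext acc j; unfold pvUpd pvCol; split <;> rfl
  rw [hfun, List.length_map, List.length_range,
    pv_foldl_set_range (fun j a => pvUpd O row j a) L _ (by simp)]
  rw [List.drop_eq_nil_of_le (by simp), List.append_nil]
  apply List.map_congr_left
  intro j hj
  rw [pv_getD_map_range g L j (List.mem_range.mp hj)]

-- B's outer loop: row-major accumulation is column-wise folding
theorem pv_outer_loop (O : List Char) (L : Nat) :
    ∀ (R : List (List Int)) (g : Nat → Int),
    R.foldl (fun acc row =>
      (List.range acc.length).foldl
        (fun (acc : List Int) (j : Nat) =>
          if PySem.List.pyGetD O (j : Int) ' ' = '*' then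
            acc.set j (acc.getD j 0 * PySem.List.pyGetD row (j : Int) 0)
          else
            acc.set j (acc.getD j 0 + PySem.List.pyGetD row (j : Int) 0)) acc)
      ((List.range L).map g)
    = (List.range L).map (fun j => R.foldl (fun a row => pvUpd O row j a) (g j)) := by
  intro R
  induction R with
  | nil => intro g; simp
  | cons row R ih =>
    intro g
    rw [List.foldl_cons, pv_inner_loop O row L g, ih (fun j => pvUpd O row j (g j))]
    simp

-- A's inner loop: gathering column i of R
theorem pv_gather (R : List (List Int)) (i : Int) :
    (PySem.List.pyRange 0 ((R.length : Int)) 1).foldl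
      (fun uu row_i => uu ++ [PySem.List.pyGetD (PySem.List.pyGetD R row_i []) i 0]) []
    = R.map (fun row => PySem.List.pyGetD row i 0) := by
  rw [PySem.List.foldl_append_singleton_eq_map]
  rw [show (fun row_i => PySem.List.pyGetD (PySem.List.pyGetD R row_i []) i 0)
      = (fun row => PySem.List.pyGetD row i 0) ∘ (fun row_i => PySem.List.pyGetD R row_i []) from rfl,
    ← List.map_map, PySem.List.map_pyGetD_pyRange_zero']
  simp

-- A's first loop builds exactly lines[:-1] parsed row by row
theorem pv_nums (lines : List String) :
    (PySem.List.pyRange 0 ((lines.length : Int) - 1) 1).foldl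
      (fun nums line_i => nums ++ [pvParseRow (PySem.List.pyGetD lines line_i "")]) []
    = lines.dropLast.map pvParseRow := by
  rw [PySem.List.foldl_append_singleton_eq_map, List.nil_append, PySem.List.pyRange_one]
  have h1 : ((lines.length : Int) - 1 - 0).toNat = lines.length - 1 := by omega
  rw [h1, List.map_map, List.dropLast_eq_take,
    ← pv_map_getD_range lines "" (lines.length - 1) (by omega), List.map_map]
  apply List.map_congr_left
  intro k _
  simp [Function.comp]

-- the two ports agree on every input (both are totalised with the same defaults)
theorem pv_ports_eq (lines : List String) : grand_total lines = grand_total_alt lines := by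
  simp only [grand_total, grand_total_alt, PySem.List.slice_to_neg_one, pv_nums]
  set R := lines.dropLast.map pvParseRow with hR
  set O := (PySem.List.pyGetD lines (-1) "").toList.filter (fun c => c ≠ ' ') with hO
  set L := (PySem.List.pyGetD R 0 []).length with hL
  simp only [pv_gather]
  rw [PySem.List.foldl_add (g := fun i => if PySem.List.pyGetD O i ' ' = '*'
      then (R.map (fun row => PySem.List.pyGetD row i 0)).prod
      else (R.map (fun row => PySem.List.pyGetD row i 0)).sum)]
  rw [pv_outer_loop O L R (fun (j : Nat) => if PySem.List.pyGetD O (j : Int) ' ' = '*' then (1 : Int) else 0)]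
  rw [PySem.List.pyRange_one]
  have h1 : ((L : Int) - 0).toNat = L := by omega
  rw [h1, List.map_map]
  rw [zero_add]
  apply congrArg List.sum
  apply List.map_congr_left
  intro j _
  simp only [Function.comp, zero_add]
  by_cases h : PySem.List.pyGetD O ((j : Nat) : Int) ' ' = '*'
  · simp only [h, if_pos]
    rw [List.prod_eq_foldl, List.foldl_map]
    apply PySem.List.foldl_congr_mem
    intro a row _
    unfold pvUpd pvCol
    rw [if_pos h]
  · simp only [h, if_false]
    rw [List.sum_eq_foldl, List.foldl_map]
    apply PySem.List.foldl_congr_mem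
    intro a row _
    unfold pvUpd pvCol
    rw [if_neg h]

-- ===== VERDICT (by name: the statement is the Claim_ definition above) =====
theorem grand_total_spec : Claim_equal_grand_total := by
  intro lines _ _
  unfold Spec_grand_total
  exact pv_ports_eq lines
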